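-- pv_equiv track=rewrite | github.com/tiagodavi70/tpi2024 | aula5/ex9.py | verificarPresenca
-- ===== SOURCE A (Python) =====
-- def verificarPresenca(vetor, numero):
--
--     adicionar = True
--     for i in range(len(vetor)):
--         if vetor[i] == numero:
--             adicionar = False
--
--     if adicionar:
--         adicionado = False
--         for i in range(len(vetor)):
--             if vetor[i] == None and not adicionado:
--                 vetor[i] = numero
--                 adicionado = True
--
--     return adicionar
-- ===== SOURCE B (Python) =====
-- def verificarPresenca(vetor, numero):
--     # single pass: detect presence and remember the first None slot
--     presente = False
--     primeiro_none = None
--     for i in range(len(vetor)):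
--         if vetor[i] == numero:
--             presente = True
--         if vetor[i] == None and primeiro_none is None:
--             primeiro_none = i
--     if not presente and primeiro_none is not None:
--         vetor[primeiro_none] = numero
--     return not presente
-- ===== Notes on version B (the rewrite author's own statement) =====
-- stated objective: alternative
-- what changed: A scans the list twice (one full pass to detect presence, a second flag-guarded pass to find the None slot); B does one combined pass that tracks a presence flag and the first None index, then writes once after the loop.
import Mathlib
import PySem

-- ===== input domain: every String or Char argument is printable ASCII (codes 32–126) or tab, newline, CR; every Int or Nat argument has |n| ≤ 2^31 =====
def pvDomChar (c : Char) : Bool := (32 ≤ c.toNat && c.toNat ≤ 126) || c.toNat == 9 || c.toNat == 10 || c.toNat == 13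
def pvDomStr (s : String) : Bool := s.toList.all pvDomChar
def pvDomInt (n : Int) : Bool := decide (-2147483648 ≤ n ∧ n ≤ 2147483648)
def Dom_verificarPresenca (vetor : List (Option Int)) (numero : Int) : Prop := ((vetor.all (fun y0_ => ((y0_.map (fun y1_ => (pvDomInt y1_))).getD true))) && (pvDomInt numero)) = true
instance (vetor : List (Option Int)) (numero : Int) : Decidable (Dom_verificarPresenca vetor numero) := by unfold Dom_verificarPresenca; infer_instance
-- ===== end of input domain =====

-- B merges A's two sequential passes into one pass (presence flag + first-None index, write after
-- the loop); equivalence proved for the RETURN value — both Pythons also mutate `vetor` the same way,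
-- but that side effect is not modeled here.

-- ===== PORT A =====
-- Python `vetor[i] == numero`: a None element never equals the int `numero`.
def pvEqNum (v : Option Int) (numero : Int) : Bool :=
  match v with
  | some x => x == numero
  | none => false

-- first loop of A: adicionar starts True, set False on any match
def verificarPresenca (vetor : List (Option Int)) (numero : Int) : Bool :=
  let adicionar := vetor.foldl (fun adicionar v => if pvEqNum v numero then false else adicionar) true
  -- (the second loop of A only mutates `vetor`; it does not affect the returned value)
  adicionar

-- ===== PORT B =====
-- single pass maintaining (presente, primeiro_none); the post-loop write mutates only `vetor`
def verificarPresenca_alt (vetor : List (Option Int)) (numero : Int) : Bool :=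
  let st := (PySem.List.enumerate vetor).foldl
    (fun (st : Bool × Option Int) (iv : Int × Option Int) =>
      let presente := if pvEqNum iv.2 numero then true else st.1
      let primeiro_none := if iv.2 == none && st.2 == none then some iv.1 else st.2
      (presente, primeiro_none))
    (false, none)
  !st.1

-- ===== PRECONDITION & SPEC =====
def Spec_verificarPresenca (vetor : List (Option Int)) (numero : Int) (out : Bool) : Prop := out = verificarPresenca_alt vetor numero
instance (vetor : List (Option Int)) (numero : Int) (out : Bool) : Decidable (Spec_verificarPresenca vetor numero out) := by unfold Spec_verificarPresenca; infer_instance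

-- ===== CLAIM (what is proved, stated in full; the proofs are below) =====
def Claim_equal_verificarPresenca : Prop := ∀ (vetor : List (Option Int)) (numero : Int), Dom_verificarPresenca vetor numero → Spec_verificarPresenca vetor numero (verificarPresenca vetor numero)

-- ===== LEMMAS AND PROOFS =====
theorem foldA_eq (numero : Int) : ∀ (l : List (Option Int)) (b : Bool),
    l.foldl (fun adicionar v => if pvEqNum v numero then false else adicionar) b
      = (b && !(l.any (fun v => pvEqNum v numero))) := by
  intro l
  induction l with
  | nil => intro b; simp
  | cons v t ih =>
    intro b
    simp only [List.foldl_cons, List.any_cons, ih]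
    cases h : pvEqNum v numero <;> simp

theorem foldB_fst (numero : Int) : ∀ (l : List (Option Int)) (s : Int) (st : Bool × Option Int),
    ((PySem.List.enumerate l s).foldl
      (fun (st : Bool × Option Int) (iv : Int × Option Int) =>
        let presente := if pvEqNum iv.2 numero then true else st.1
        let primeiro_none := if iv.2 == none && st.2 == none then some iv.1 else st.2
        (presente, primeiro_none))
      st).1 = (st.1 || l.any (fun v => pvEqNum v numero)) := by
  intro l
  induction l with
  | nil => intro s st; simp [PySem.List.enumerate_nil]
  | cons v t ih =>
    intro s st
    simp only [PySem.List.enumerate_cons, List.foldl_cons, List.any_cons, ih]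
    cases h : pvEqNum v numero <;> simp

-- ===== VERDICT (by name: the statement is the Claim_ definition above) =====
theorem verificarPresenca_spec : Claim_equal_verificarPresenca := by
  intro vetor numero _
  unfold Spec_verificarPresenca verificarPresenca verificarPresenca_alt
  simp only [foldA_eq, foldB_fst, Bool.false_or, Bool.true_and]
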